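-- pv_equiv track=rewrite | github.com/SilviuSavu/Nautilus | backend/bci_immersive/multimodal_interface.py | _are_similar_shapes
-- ===== SOURCE A (Python) =====
-- def _are_similar_shapes(shape1: str, shape2: str) -> bool:
--     """Check if two hand shapes are similar"""
--     similar_groups = [
--         ['thumbs_up', 'thumbs_down'],
--         ['open_hand', '5_fingers'],
--         ['closed_fist', '0_fingers'],
--         ['index_extended', '1_fingers'],
--         ['pinch', 'ok_sign']
--     ]
--
--     for group in similar_groups:
--         if shape1 in group and shape2 in group:
--             return True
--
--     return False
-- ===== SOURCE B (Python) =====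
-- _GROUP_INDEX = {
--     shape: i
--     for i, group in enumerate([
--         ['thumbs_up', 'thumbs_down'],
--         ['open_hand', '5_fingers'],
--         ['closed_fist', '0_fingers'],
--         ['index_extended', '1_fingers'],
--         ['pinch', 'ok_sign'],
--     ])
--     for shape in group
-- }
--
--
-- def _are_similar_shapes(shape1: str, shape2: str) -> bool:
--     """Check if two hand shapes are similar (same similarity group)."""
--     g1 = _GROUP_INDEX.get(shape1)
--     g2 = _GROUP_INDEX.get(shape2)
--     return g1 is not None and g1 == g2
-- ===== Notes on version B (the rewrite author's own statement) =====
-- stated objective: idiomatic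
-- what changed: Replaces the per-call scan over groups (with two membership tests per group) by a precomputed shape->group-index dictionary built once, so each call is two lookups and one comparison.
import Mathlib
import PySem

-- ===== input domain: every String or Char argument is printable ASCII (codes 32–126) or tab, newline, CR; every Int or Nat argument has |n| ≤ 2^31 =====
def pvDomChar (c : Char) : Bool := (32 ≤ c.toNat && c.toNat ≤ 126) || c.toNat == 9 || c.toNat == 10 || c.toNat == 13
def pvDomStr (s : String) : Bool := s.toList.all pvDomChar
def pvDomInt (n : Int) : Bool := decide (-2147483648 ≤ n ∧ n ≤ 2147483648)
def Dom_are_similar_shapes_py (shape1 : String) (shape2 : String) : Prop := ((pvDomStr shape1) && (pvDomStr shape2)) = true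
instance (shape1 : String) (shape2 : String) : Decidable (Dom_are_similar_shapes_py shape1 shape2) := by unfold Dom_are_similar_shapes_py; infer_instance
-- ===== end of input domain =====

-- ===== PORT A =====
-- B builds a shape -> group-index dictionary once; each call is two lookups and an equality check (idiomatic).
-- Port of A: scan the list of similarity groups, return true on the first group containing both shapes.
def pvSimilarGroups : List (List String) :=
  [["thumbs_up", "thumbs_down"],
   ["open_hand", "5_fingers"],
   ["closed_fist", "0_fingers"],
   ["index_extended", "1_fingers"],
   ["pinch", "ok_sign"]]

def pvAGo (shape1 : String) (shape2 : String) : List (List String) → Bool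
  | [] => false
  | group :: rest =>
      if group.contains shape1 && group.contains shape2 then true
      else pvAGo shape1 shape2 rest

def are_similar_shapes_py (shape1 : String) (shape2 : String) : Bool :=
  pvAGo shape1 shape2 pvSimilarGroups

-- ===== PORT B =====
-- the dict comprehension {shape: i for i, group in enumerate(...) for shape in group}
def pvGroupIndex : PySem.Dict String Int :=
  (PySem.List.enumerate pvSimilarGroups).foldl
    (fun d p => p.2.foldl (fun d shape => d.insert shape p.1) d)
    PySem.Dict.empty

def are_similar_shapes_py_alt (shape1 : String) (shape2 : String) : Bool :=
  match pvGroupIndex.get? shape1, pvGroupIndex.get? shape2 with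
  | some g1, some g2 => g1 == g2
  | _, _ => false

-- ===== PRECONDITION & SPEC =====
def Spec_are_similar_shapes_py (shape1 : String) (shape2 : String) (out : Bool) : Prop := out = are_similar_shapes_py_alt shape1 shape2
instance (shape1 : String) (shape2 : String) (out : Bool) : Decidable (Spec_are_similar_shapes_py shape1 shape2 out) := by unfold Spec_are_similar_shapes_py; infer_instance

-- ===== CLAIM (what is proved, stated in full; the proofs are below) =====
def Claim_equal_are_similar_shapes_py : Prop := ∀ (shape1 : String) (shape2 : String), Dom_are_similar_shapes_py shape1 shape2 → Spec_are_similar_shapes_py shape1 shape2 (are_similar_shapes_py shape1 shape2)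

-- ===== LEMMAS AND PROOFS =====

-- The table, evaluated: get? on it is a chain of tests over the ten shape literals.
theorem pvGroupIndex_get? (s : String) :
    pvGroupIndex.get? s =
      if "thumbs_up" == s then some 0
      else if "thumbs_down" == s then some 0
      else if "open_hand" == s then some 1
      else if "5_fingers" == s then some 1
      else if "closed_fist" == s then some 2
      else if "0_fingers" == s then some 2
      else if "index_extended" == s then some 3
      else if "1_fingers" == s then some 3
      else if "pinch" == s then some 4
      else if "ok_sign" == s then some 4
      else none := by
  show (PySem.Dict.mk [("thumbs_up", 0), ("thumbs_down", 0), ("open_hand", 1), ("5_fingers", 1),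
        ("closed_fist", 2), ("0_fingers", 2), ("index_extended", 3), ("1_fingers", 3),
        ("pinch", 4), ("ok_sign", 4)]).get? s = _
  simp only [PySem.Dict.get?_mk_cons]
  rfl

-- ===== VERDICT (by name: the statement is the Claim_ definition above) =====
set_option maxHeartbeats 1000000 in
theorem are_similar_shapes_py_spec : Claim_equal_are_similar_shapes_py := by
  intro s1 s2 hd
  unfold Spec_are_similar_shapes_py are_similar_shapes_py are_similar_shapes_py_alt
  clear hd
  by_cases h0 : "thumbs_up" = s1
  · subst h0
    rw [pvGroupIndex_get? s2]
    simp only [pvAGo, pvSimilarGroups, List.contains_cons, List.contains_nil]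
    norm_num
    split_ifs <;> subst_vars <;> first | decide | simp_all [eq_comm]
  · 
    by_cases h1 : "thumbs_down" = s1
    · subst h1
      clear h0
      rw [pvGroupIndex_get? s2]
      simp only [pvAGo, pvSimilarGroups, List.contains_cons, List.contains_nil]
      norm_num
      split_ifs <;> subst_vars <;> first | decide | simp_all [eq_comm]
    · 
      by_cases h2 : "open_hand" = s1
      · subst h2
        clear h0 h1
        rw [pvGroupIndex_get? s2]
        simp only [pvAGo, pvSimilarGroups, List.contains_cons, List.contains_nil]
        norm_num
        split_ifs <;> subst_vars <;> first | decide | simp_all [eq_comm]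
      · 
        by_cases h3 : "5_fingers" = s1
        · subst h3
          clear h0 h1 h2
          rw [pvGroupIndex_get? s2]
          simp only [pvAGo, pvSimilarGroups, List.contains_cons, List.contains_nil]
          norm_num
          split_ifs <;> subst_vars <;> first | decide | simp_all [eq_comm]
        · 
          by_cases h4 : "closed_fist" = s1
          · subst h4
            clear h0 h1 h2 h3
            rw [pvGroupIndex_get? s2]
            simp only [pvAGo, pvSimilarGroups, List.contains_cons, List.contains_nil]
            norm_num
            split_ifs <;> subst_vars <;> first | decide | simp_all [eq_comm]
          · 
            by_cases h5 : "0_fingers" = s1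
            · subst h5
              clear h0 h1 h2 h3 h4
              rw [pvGroupIndex_get? s2]
              simp only [pvAGo, pvSimilarGroups, List.contains_cons, List.contains_nil]
              norm_num
              split_ifs <;> subst_vars <;> first | decide | simp_all [eq_comm]
            · 
              by_cases h6 : "index_extended" = s1
              · subst h6
                clear h0 h1 h2 h3 h4 h5
                rw [pvGroupIndex_get? s2]
                simp only [pvAGo, pvSimilarGroups, List.contains_cons, List.contains_nil]
                norm_num
                split_ifs <;> subst_vars <;> first | decide | simp_all [eq_comm]
              · 
                by_cases h7 : "1_fingers" = s1
                · subst h7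
                  clear h0 h1 h2 h3 h4 h5 h6
                  rw [pvGroupIndex_get? s2]
                  simp only [pvAGo, pvSimilarGroups, List.contains_cons, List.contains_nil]
                  norm_num
                  split_ifs <;> subst_vars <;> first | decide | simp_all [eq_comm]
                · 
                  by_cases h8 : "pinch" = s1
                  · subst h8
                    clear h0 h1 h2 h3 h4 h5 h6 h7
                    rw [pvGroupIndex_get? s2]
                    simp only [pvAGo, pvSimilarGroups, List.contains_cons, List.contains_nil]
                    norm_num
                    split_ifs <;> subst_vars <;> first | decide | simp_all [eq_comm]
                  · 
                    by_cases h9 : "ok_sign" = s1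
                    · subst h9
                      clear h0 h1 h2 h3 h4 h5 h6 h7 h8
                      rw [pvGroupIndex_get? s2]
                      simp only [pvAGo, pvSimilarGroups, List.contains_cons, List.contains_nil]
                      norm_num
                      split_ifs <;> subst_vars <;> first | decide | simp_all [eq_comm]
                    · -- s1 matches no shape literal: A scans to false, B sees get? s1 = none
                      have hget : pvGroupIndex.get? s1 = none := by
                        rw [pvGroupIndex_get?]; simp [h0, h1, h2, h3, h4, h5, h6, h7, h8, h9]
                      rw [hget]
                      have k0 : ¬ s1 = "thumbs_up" := fun h => h0 h.symm
                      have k1 : ¬ s1 = "thumbs_down" := fun h => h1 h.symm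
                      have k2 : ¬ s1 = "open_hand" := fun h => h2 h.symm
                      have k3 : ¬ s1 = "5_fingers" := fun h => h3 h.symm
                      have k4 : ¬ s1 = "closed_fist" := fun h => h4 h.symm
                      have k5 : ¬ s1 = "0_fingers" := fun h => h5 h.symm
                      have k6 : ¬ s1 = "index_extended" := fun h => h6 h.symm
                      have k7 : ¬ s1 = "1_fingers" := fun h => h7 h.symm
                      have k8 : ¬ s1 = "pinch" := fun h => h8 h.symm
                      have k9 : ¬ s1 = "ok_sign" := fun h => h9 h.symm
                      simp only [pvAGo, pvSimilarGroups, List.contains_cons, List.contains_nil]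
                      simp [k0, k1, k2, k3, k4, k5, k6, k7, k8, k9]
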